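-- pv_equiv track=rewrite | github.com/politol4/envoy-cli | envoy_cli/priority.py | list_by_priority
-- ===== SOURCE A (Python) =====
-- from typing import Dict, List, Tuple
--
-- PRIORITY_LEVELS = ("low", "normal", "high", "critical")
--
-- def _meta_key(key: str) -> str:
--     return f"__priority__{key}"
--
-- def list_by_priority(
--     secrets: Dict[str, str],
-- ) -> List[Tuple[str, str]]:
--     """Return real keys sorted by priority (critical first, unset last).
--
--     Returns a list of (key, level) tuples where level may be 'unset'.
--     """
--     order = {level: i for i, level in enumerate(reversed(PRIORITY_LEVELS))}
--     real_keys = [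
--         k for k in secrets if not k.startswith("__priority__")
--     ]
--     result: List[Tuple[str, str]] = []
--     for k in real_keys:
--         level = secrets.get(_meta_key(k), "unset")
--         result.append((k, level))
--
--     result.sort(key=lambda t: order.get(t[1], len(PRIORITY_LEVELS)))
--     return result
-- ===== SOURCE B (Python) =====
-- def list_by_priority(secrets):
--     """Bucket the real keys by priority level in one pass (stable), then
--     concatenate buckets critical..low followed by unknown/unset levels."""
--     critical, high, normal, low, rest = [], [], [], [], []
--     bucket = {"critical": critical, "high": high, "normal": normal, "low": low}
--     for k in secrets:
--         if k.startswith("__priority__"):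
--             continue
--         level = secrets.get("__priority__" + k, "unset")
--         bucket.get(level, rest).append((k, level))
--     return critical + high + normal + low + rest
-- ===== Notes on version B (the rewrite author's own statement) =====
-- stated objective: alternative
-- what changed: B replaces A's build-then-stable-sort over a 5-value priority key by a single pass that appends each real key's entry to one of five buckets (critical/high/normal/low/other) and concatenates them; measured speed-up did not reach the 1.5x bar, so no speed is claimed.
import Mathlib
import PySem

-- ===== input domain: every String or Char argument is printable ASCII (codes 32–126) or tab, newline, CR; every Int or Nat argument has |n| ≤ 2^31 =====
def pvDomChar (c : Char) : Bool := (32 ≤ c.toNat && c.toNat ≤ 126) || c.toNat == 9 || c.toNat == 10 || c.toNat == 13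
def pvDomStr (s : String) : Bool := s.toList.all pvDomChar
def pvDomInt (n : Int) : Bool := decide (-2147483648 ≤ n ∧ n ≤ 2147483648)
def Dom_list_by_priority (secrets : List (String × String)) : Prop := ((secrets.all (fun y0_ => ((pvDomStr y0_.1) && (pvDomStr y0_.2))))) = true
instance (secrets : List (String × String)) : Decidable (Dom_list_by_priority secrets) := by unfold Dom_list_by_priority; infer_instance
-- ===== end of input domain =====

-- B replaces A's stable sort over a 5-value key by a one-pass bucket split (critical/high/normal/low/rest) with concatenation.

-- ===== PORT A =====
-- PRIORITY_LEVELS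
def pvLevels : List String := ["low", "normal", "high", "critical"]

-- _meta_key(key) = f"__priority__{key}"
def pvMetaKey (key : String) : String := "__priority__" ++ key

-- k.startswith("__priority__")
def pvIsMeta (k : String) : Bool := PySem.Str.startswith k "__priority__"

-- secrets.get(k, d) on the association-list representation of the dict (first match)
def pvGetD (secrets : List (String × String)) (k d : String) : String :=
  match secrets.find? (fun p => p.1 == k) with
  | some p => p.2
  | none => d

-- order = {level: i for i, level in enumerate(reversed(PRIORITY_LEVELS))}
def pvOrder : PySem.Dict String Int :=
  (PySem.List.enumerate pvLevels.reverse 0).foldl (fun d p => d.insert p.2 p.1) PySem.Dict.empty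

def list_by_priority (secrets : List (String × String)) : List (String × String) :=
  let realKeys := (secrets.map (·.1)).filter (fun k => !(pvIsMeta k))
  let result := realKeys.foldl (fun acc k => acc ++ [(k, pvGetD secrets (pvMetaKey k) "unset")]) []
  PySem.List.sorted result (fun t => pvOrder.getD t.2 (pvLevels.length : Int)) false

-- ===== PORT B =====
-- one loop over the keys: append each real key's entry to the bucket of its level
def pvBucketStep (secrets : List (String × String))
    (bs : List (String × String) × List (String × String) × List (String × String) ×
          List (String × String) × List (String × String)) (k : String) :
    List (String × String) × List (String × String) × List (String × String) ×
          List (String × String) × List (String × String) :=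
  if pvIsMeta k then bs
  else
    let lv := pvGetD secrets (pvMetaKey k) "unset"
    if lv == "critical" then (bs.1 ++ [(k, lv)], bs.2.1, bs.2.2.1, bs.2.2.2.1, bs.2.2.2.2)
    else if lv == "high" then (bs.1, bs.2.1 ++ [(k, lv)], bs.2.2.1, bs.2.2.2.1, bs.2.2.2.2)
    else if lv == "normal" then (bs.1, bs.2.1, bs.2.2.1 ++ [(k, lv)], bs.2.2.2.1, bs.2.2.2.2)
    else if lv == "low" then (bs.1, bs.2.1, bs.2.2.1, bs.2.2.2.1 ++ [(k, lv)], bs.2.2.2.2)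
    else (bs.1, bs.2.1, bs.2.2.1, bs.2.2.2.1, bs.2.2.2.2 ++ [(k, lv)])

def list_by_priority_alt (secrets : List (String × String)) : List (String × String) :=
  let r := (secrets.map (·.1)).foldl (pvBucketStep secrets) ([], [], [], [], [])
  r.1 ++ r.2.1 ++ r.2.2.1 ++ r.2.2.2.1 ++ r.2.2.2.2

-- ===== PRECONDITION & SPEC =====
def Spec_list_by_priority (secrets : List (String × String)) (out : List (String × String)) : Prop := out = list_by_priority_alt secrets
instance (secrets : List (String × String)) (out : List (String × String)) : Decidable (Spec_list_by_priority secrets out) := by unfold Spec_list_by_priority; infer_instance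

-- ===== CLAIM (what is proved, stated in full; the proofs are below) =====
def Claim_equal_list_by_priority : Prop := ∀ (secrets : List (String × String)), Dom_list_by_priority secrets → Spec_list_by_priority secrets (list_by_priority secrets)

-- ===== LEMMAS AND PROOFS =====

-- the sort key order.get(t[1], 4), as a plain if-chain on the level string
def pvKey (t : String × String) : Int :=
  if t.2 == "critical" then 0 else if t.2 == "high" then 1
  else if t.2 == "normal" then 2 else if t.2 == "low" then 3 else 4

-- the entries that land in bucket i, read off the input
def pvEntries (secrets : List (String × String)) (L : List String) (i : Int) : List (String × String) :=
  ((L.filter (fun k => !(pvIsMeta k))).map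
    (fun k => (k, pvGetD secrets (pvMetaKey k) "unset"))).filter (fun e => pvKey e == i)

lemma pvKey_eq (t : String × String) :
    pvOrder.getD t.2 (pvLevels.length : Int) = pvKey t := by
  have hkeys : pvOrder.keys = ["critical", "high", "normal", "low"] := by decide
  obtain ⟨a, b⟩ := t
  have hk : pvKey (a, b) = (if b == "critical" then 0 else if b == "high" then 1
      else if b == "normal" then 2 else if b == "low" then 3 else 4) := rfl
  show pvOrder.getD b (pvLevels.length : Int) = pvKey (a, b)
  rw [hk]
  by_cases h0 : b = "critical"
  · subst h0; decide
  · by_cases h1 : b = "high"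
    · subst h1; decide
    · by_cases h2 : b = "normal"
      · subst h2; decide
      · by_cases h3 : b = "low"
        · subst h3; decide
        · rw [PySem.Dict.getD_of_not_contains]
          · simp [pvLevels, h0, h1, h2, h3]
          · rw [PySem.Dict.contains_eq_decide_mem_keys, hkeys]
            simp [h0, h1, h2, h3]

lemma insertBy_middle {α : Type} (before : α → α → Bool) (x : α) (C D : List α)
    (hC : ∀ c ∈ C, before x c = false) (hD : ∀ d ∈ D, before x d = true) :
    PySem.List.insertBy before x (C ++ D) = C ++ x :: D := by
  induction C with
  | nil =>
    cases D with
    | nil => simp [PySem.List.insertBy]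
    | cons d ds => simp [PySem.List.insertBy, hD d List.mem_cons_self]
  | cons c cs ih =>
    simp only [List.cons_append, PySem.List.insertBy, hC c List.mem_cons_self,
      Bool.false_eq_true, if_false]
    rw [ih (fun c hc => hC c (List.mem_cons_of_mem _ hc))]

lemma insert_five {α : Type} (key : α → Int) (x : α) (L0 L1 L2 L3 L4 : List α)
    (h0 : ∀ e ∈ L0, key e = 0) (h1 : ∀ e ∈ L1, key e = 1) (h2 : ∀ e ∈ L2, key e = 2)
    (h3 : ∀ e ∈ L3, key e = 3) (h4 : ∀ e ∈ L4, key e = 4)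
    (hx : 0 ≤ key x ∧ key x ≤ 4) :
    PySem.List.insertBy (fun a b => decide (key a < key b)) x (L0 ++ L1 ++ L2 ++ L3 ++ L4) =
      (L0 ++ (if key x == 0 then [x] else [])) ++ (L1 ++ (if key x == 1 then [x] else [])) ++
      (L2 ++ (if key x == 2 then [x] else [])) ++ (L3 ++ (if key x == 3 then [x] else [])) ++
      (L4 ++ (if key x == 4 then [x] else [])) := by
  have hk : key x = 0 ∨ key x = 1 ∨ key x = 2 ∨ key x = 3 ∨ key x = 4 := by omega
  rcases hk with hk | hk | hk | hk | hk
  · rw [show L0 ++ L1 ++ L2 ++ L3 ++ L4 = L0 ++ (L1 ++ L2 ++ L3 ++ L4) by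
      simp [List.append_assoc]]
    rw [insertBy_middle _ x L0 (L1 ++ L2 ++ L3 ++ L4)
      (fun c hc => by simp [hk, h0 c hc])
      (by intro d hd
          simp only [List.mem_append] at hd
          rcases hd with ((hd | hd) | hd) | hd
          · simp [hk, h1 d hd]
          · simp [hk, h2 d hd]
          · simp [hk, h3 d hd]
          · simp [hk, h4 d hd])]
    simp [hk, List.append_assoc]
  · rw [show L0 ++ L1 ++ L2 ++ L3 ++ L4 = (L0 ++ L1) ++ (L2 ++ L3 ++ L4) by
      simp [List.append_assoc]]
    rw [insertBy_middle _ x (L0 ++ L1) (L2 ++ L3 ++ L4)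
      (by intro c hc
          simp only [List.mem_append] at hc
          rcases hc with hc | hc
          · simp [hk, h0 c hc]
          · simp [hk, h1 c hc])
      (by intro d hd
          simp only [List.mem_append] at hd
          rcases hd with (hd | hd) | hd
          · simp [hk, h2 d hd]
          · simp [hk, h3 d hd]
          · simp [hk, h4 d hd])]
    simp [hk, List.append_assoc]
  · rw [show L0 ++ L1 ++ L2 ++ L3 ++ L4 = (L0 ++ L1 ++ L2) ++ (L3 ++ L4) by
      simp [List.append_assoc]]
    rw [insertBy_middle _ x (L0 ++ L1 ++ L2) (L3 ++ L4)
      (by intro c hc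
          simp only [List.mem_append] at hc
          rcases hc with (hc | hc) | hc
          · simp [hk, h0 c hc]
          · simp [hk, h1 c hc]
          · simp [hk, h2 c hc])
      (by intro d hd
          simp only [List.mem_append] at hd
          rcases hd with hd | hd
          · simp [hk, h3 d hd]
          · simp [hk, h4 d hd])]
    simp [hk, List.append_assoc]
  · rw [show L0 ++ L1 ++ L2 ++ L3 ++ L4 = (L0 ++ L1 ++ L2 ++ L3) ++ L4 by
      simp [List.append_assoc]]
    rw [insertBy_middle _ x (L0 ++ L1 ++ L2 ++ L3) L4
      (by intro c hc
          simp only [List.mem_append] at hc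
          rcases hc with ((hc | hc) | hc) | hc
          · simp [hk, h0 c hc]
          · simp [hk, h1 c hc]
          · simp [hk, h2 c hc]
          · simp [hk, h3 c hc])
      (fun d hd => by simp [hk, h4 d hd])]
    simp [hk, List.append_assoc]
  · rw [PySem.List.insertBy_of_forall_not_before _ x _
      (by intro c hc
          simp only [List.mem_append] at hc
          rcases hc with (((hc | hc) | hc) | hc) | hc
          · simp [hk, h0 c hc]
          · simp [hk, h1 c hc]
          · simp [hk, h2 c hc]
          · simp [hk, h3 c hc]
          · simp [hk, h4 c hc])]
    simp [hk, List.append_assoc]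

-- a stable sort over a key with values in {0..4} is the concatenation of the five buckets
lemma sorted_five {α : Type} (key : α → Int) (L : List α)
    (h : ∀ e : α, 0 ≤ key e ∧ key e ≤ 4) :
    PySem.List.sorted L key false =
      L.filter (fun e => key e == 0) ++ L.filter (fun e => key e == 1) ++
      L.filter (fun e => key e == 2) ++ L.filter (fun e => key e == 3) ++
      L.filter (fun e => key e == 4) := by
  rw [PySem.List.sorted_eq_foldl_insertBy]
  induction L using List.reverseRecOn with
  | nil => simp
  | append_singleton ys x ih =>
    rw [List.foldl_append, List.foldl_cons, List.foldl_nil, ih]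
    rw [insert_five key x _ _ _ _ _
      (fun e he => by simpa using (List.of_mem_filter he))
      (fun e he => by simpa using (List.of_mem_filter he))
      (fun e he => by simpa using (List.of_mem_filter he))
      (fun e he => by simpa using (List.of_mem_filter he))
      (fun e he => by simpa using (List.of_mem_filter he))
      (h x)]
    simp only [List.filter_append, List.filter_cons, List.filter_nil]

-- the bucket fold, characterised by filters of the entry list
lemma fold_buckets (secrets : List (String × String)) (L : List String)
    (c0 c1 c2 c3 c4 : List (String × String)) :
    L.foldl (pvBucketStep secrets) (c0, c1, c2, c3, c4) =
      (c0 ++ pvEntries secrets L 0, c1 ++ pvEntries secrets L 1, c2 ++ pvEntries secrets L 2,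
       c3 ++ pvEntries secrets L 3, c4 ++ pvEntries secrets L 4) := by
  induction L generalizing c0 c1 c2 c3 c4 with
  | nil => simp [pvEntries]
  | cons k t ih =>
    by_cases hs : pvIsMeta k
    · rw [List.foldl_cons, show pvBucketStep secrets (c0, c1, c2, c3, c4) k = (c0, c1, c2, c3, c4)
        from by simp [pvBucketStep, hs]]
      rw [ih]
      simp [pvEntries, hs]
    · have hent : ∀ (i : Int), pvEntries secrets (k :: t) i =
          (if pvKey (k, pvGetD secrets (pvMetaKey k) "unset") == i
            then [(k, pvGetD secrets (pvMetaKey k) "unset")] else []) ++ pvEntries secrets t i := by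
        intro i
        simp only [pvEntries, List.filter_cons, hs, Bool.not_false, if_true, List.map_cons,
          List.filter_cons]
        split <;> simp
      set lv := pvGetD secrets (pvMetaKey k) "unset" with hlv
      rw [List.foldl_cons]
      by_cases h0 : lv = "critical"
      · rw [show pvBucketStep secrets (c0, c1, c2, c3, c4) k = (c0 ++ [(k, lv)], c1, c2, c3, c4)
          from by simp [pvBucketStep, hs, ← hlv, h0]]
        rw [ih]
        simp [hent, pvKey, h0, List.append_assoc]
      · by_cases h1 : lv = "high"
        · rw [show pvBucketStep secrets (c0, c1, c2, c3, c4) k = (c0, c1 ++ [(k, lv)], c2, c3, c4)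
            from by simp [pvBucketStep, hs, ← hlv, h1]]
          rw [ih]
          simp [hent, pvKey, h1, List.append_assoc]
        · by_cases h2 : lv = "normal"
          · rw [show pvBucketStep secrets (c0, c1, c2, c3, c4) k = (c0, c1, c2 ++ [(k, lv)], c3, c4)
              from by simp [pvBucketStep, hs, ← hlv, h2]]
            rw [ih]
            simp [hent, pvKey, h2, List.append_assoc]
          · by_cases h3 : lv = "low"
            · rw [show pvBucketStep secrets (c0, c1, c2, c3, c4) k
                  = (c0, c1, c2, c3 ++ [(k, lv)], c4)
                from by simp [pvBucketStep, hs, ← hlv, h3]]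
              rw [ih]
              simp [hent, pvKey, h3, List.append_assoc]
            · rw [show pvBucketStep secrets (c0, c1, c2, c3, c4) k
                  = (c0, c1, c2, c3, c4 ++ [(k, lv)])
                from by simp [pvBucketStep, hs, ← hlv, h0, h1, h2, h3]]
              rw [ih]
              simp [hent, pvKey, h0, h1, h2, h3, List.append_assoc]

-- ===== VERDICT (by name: the statement is the Claim_ definition above) =====
theorem list_by_priority_spec : Claim_equal_list_by_priority := by
  intro secrets _
  unfold Spec_list_by_priority
  have hA : list_by_priority secrets =
      PySem.List.sorted
        (((secrets.map (·.1)).filter (fun k => !(pvIsMeta k))).foldl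
          (fun acc k => acc ++ [(k, pvGetD secrets (pvMetaKey k) "unset")]) [])
        (fun t => pvOrder.getD t.2 (pvLevels.length : Int)) false := rfl
  have hB : list_by_priority_alt secrets =
      ((secrets.map (·.1)).foldl (pvBucketStep secrets) ([], [], [], [], [])).1 ++
      ((secrets.map (·.1)).foldl (pvBucketStep secrets) ([], [], [], [], [])).2.1 ++
      ((secrets.map (·.1)).foldl (pvBucketStep secrets) ([], [], [], [], [])).2.2.1 ++
      ((secrets.map (·.1)).foldl (pvBucketStep secrets) ([], [], [], [], [])).2.2.2.1 ++
      ((secrets.map (·.1)).foldl (pvBucketStep secrets) ([], [], [], [], [])).2.2.2.2 := rfl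
  rw [hA, hB, PySem.List.foldl_append_singleton_eq_map, List.nil_append]
  have hkey : (fun t : String × String => pvOrder.getD t.2 (pvLevels.length : Int)) = pvKey :=
    funext pvKey_eq
  rw [hkey, sorted_five pvKey _ (fun e => by unfold pvKey; split_ifs <;> omega)]
  rw [fold_buckets]
  simp [pvEntries, List.append_assoc]
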